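-- pv_equiv track=rewrite | github.com/dorothee-siris/openalex-retriever | core/processors.py | deduplicate_publications_optimized
-- ===== SOURCE A (Python) =====
-- from typing import Dict, List, Any, Optional
--
-- def deduplicate_publications_optimized(all_publications: List[Dict]) -> List[Dict]:
--     """
--     Merge duplicates by work id.
--     - Combine institutions (set)
--     - Combine matched authors from the user list (map: 'Name, Surname' -> position)
--     - Output aligned pipes: 'Authors Extracted' and 'Author Position'
--     """
--     seen: Dict[str, Dict] = {}
--
--     for pub in all_publications:
--         pub_id = pub.get("id", "")
--         if not pub_id:
--             continue
--
--         entry = seen.get(pub_id)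
--         if not entry:
--             entry = {
--                 "data": pub,
--                 "institutions": set(),
--                 "author_positions": {},  # { "Name, Surname": "First/Middle/Last/Not found" }
--             }
--             seen[pub_id] = entry
--
--         inst = (pub.get("institutions_extracted") or "").strip()
--         if inst:
--             entry["institutions"].add(inst)
--
--         author_label = (pub.get("authors_extracted") or "").strip()    # "Name, Surname"
--         position = (pub.get("position_extracted") or "").strip()
--         if author_label:
--             # don't overwrite an existing position unless the new one is non-empty
--             if author_label not in entry["author_positions"] or not entry["author_positions"][author_label]:
--                 entry["author_positions"][author_label] = position
--
--     # Build final rows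
--     result: List[Dict] = []
--     for item in seen.values():
--         row = item["data"].copy()
--
--         inst_list = sorted(filter(None, item["institutions"]))
--         # sort authors alphabetically for a stable order
--         author_labels = sorted(item["author_positions"].keys())
--
--         row["institutions_extracted"] = " | ".join(inst_list)
--         row["authors_extracted"] = " | ".join(author_labels)
--         row["position_extracted"] = " | ".join(item["author_positions"].get(a, "") for a in author_labels)
--
--         result.append(row)
--
--     return result
-- ===== SOURCE B (Python) =====
-- def deduplicate_publications_optimized(all_publications):
--     # Declarative per-id recomputation: keep pubs with an id, list the distinct ids
--     # in first-occurrence order, and for each id derive every output field directly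
--     # from the id's group by comprehensions (no mutable per-entry records).
--     def fld(p, k):
--         return (p.get(k) or "").strip()
--
--     pubs = [p for p in all_publications if p.get("id", "")]
--     ids = list(dict.fromkeys(p.get("id", "") for p in pubs))
--
--     result = []
--     for pid in ids:
--         grp = [p for p in pubs if p.get("id", "") == pid]
--         insts = sorted(set(v for v in (fld(p, "institutions_extracted") for p in grp) if v))
--         labels = sorted(set(a for a in (fld(p, "authors_extracted") for p in grp) if a))
--
--         def pos_of(a):
--             # A author's position is the first non-empty one recorded for it.
--             p = next((p for p in grp
--                       if fld(p, "authors_extracted") == a and fld(p, "position_extracted")), None)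
--             return fld(p, "position_extracted") if p else ""
--
--         row = dict(grp[0])
--         row["institutions_extracted"] = " | ".join(insts)
--         row["authors_extracted"] = " | ".join(labels)
--         row["position_extracted"] = " | ".join(pos_of(a) for a in labels)
--         result.append(row)
--     return result
-- ===== Notes on version B (the rewrite author's own statement) =====
-- stated objective: alternative
-- what changed: B drops A's single stateful pass that mutates per-id entry records (a set and a position dict) inside one 'seen' map; instead it lists the distinct ids in first-occurrence order and recomputes each output field declaratively from the id's group: institutions/authors as sorted deduplicated comprehensions and each author's position as a first-match search for the first non-empty position.
import Mathlib
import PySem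

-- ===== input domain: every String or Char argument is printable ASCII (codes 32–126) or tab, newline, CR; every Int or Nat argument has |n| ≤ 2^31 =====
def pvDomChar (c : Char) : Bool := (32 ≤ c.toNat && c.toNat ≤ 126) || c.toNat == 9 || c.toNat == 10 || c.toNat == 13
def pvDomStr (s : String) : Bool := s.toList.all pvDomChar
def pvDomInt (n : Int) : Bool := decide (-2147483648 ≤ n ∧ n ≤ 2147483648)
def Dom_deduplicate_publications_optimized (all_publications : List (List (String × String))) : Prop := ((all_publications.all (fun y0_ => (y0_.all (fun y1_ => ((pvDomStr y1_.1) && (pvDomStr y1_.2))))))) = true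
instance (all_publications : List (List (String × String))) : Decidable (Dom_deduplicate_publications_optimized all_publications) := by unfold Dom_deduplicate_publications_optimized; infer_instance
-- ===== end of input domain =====

-- B replaces A's single stateful merge pass by a declarative per-id recomputation
-- (distinct ids in order, each output field derived from the id's group by
-- comprehensions / a first-match search); equal return values, no speed claim.

-- ===== PORT A =====
-- entry = (data, (institutions, author_positions)), Python's {"data":…, "institutions":…, "author_positions":…}
def pvA_entryInit (d : PySem.Dict String String) :
    PySem.Dict String String × (PySem.Set String × PySem.Dict String String) :=
  (d, (PySem.Set.empty, PySem.Dict.empty))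

-- body of A's first loop after the entry is present: add institution, maybe set author position
def pvA_update (e : PySem.Dict String String × (PySem.Set String × PySem.Dict String String))
    (d : PySem.Dict String String) :
    PySem.Dict String String × (PySem.Set String × PySem.Dict String String) :=
  let inst := PySem.Str.strip (d.getD "institutions_extracted" "")
  let insts := if inst == "" then e.2.1 else PySem.Set.add e.2.1 inst
  let author := PySem.Str.strip (d.getD "authors_extracted" "")
  let pos := PySem.Str.strip (d.getD "position_extracted" "")
  let ap :=
    if author == "" then e.2.2
    else if !e.2.2.contains author || e.2.2.getD author "" == "" then e.2.2.insert author pos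
    else e.2.2
  (e.1, (insts, ap))

-- body of A's second loop: row = data.copy(); three assignments; returned as items
def pvA_fmt (e : PySem.Dict String String × (PySem.Set String × PySem.Dict String String)) :
    List (String × String) :=
  let instList := PySem.List.sorted (e.2.1.filter (fun s => !(s == ""))) (fun x => x) false
  let labels := PySem.List.sorted e.2.2.keys (fun x => x) false
  ((((e.1.insert "institutions_extracted" (PySem.Str.join " | " instList)).insert
      "authors_extracted" (PySem.Str.join " | " labels)).insert
      "position_extracted" (PySem.Str.join " | " (labels.map (fun a => e.2.2.getD a "")))).items)

def deduplicate_publications_optimized (all_publications : List (List (String × String))) :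
    List (List (String × String)) :=
  let seen := all_publications.foldl (fun seen pub =>
    let d := PySem.Dict.ofList pub
    let pid := d.getD "id" ""
    if pid == "" then seen
    else seen.insert pid (pvA_update ((seen.get? pid).getD (pvA_entryInit d)) d)) PySem.Dict.empty
  seen.values.foldl (fun acc e => acc ++ [pvA_fmt e]) []

-- ===== PORT B =====
-- fld(p, k) = (p.get(k) or "").strip()
def pvB_fld (p : List (String × String)) (k : String) : String :=
  PySem.Str.strip ((PySem.Dict.ofList p).getD k "")

def pvB_id (p : List (String × String)) : String :=
  (PySem.Dict.ofList p).getD "id" ""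

-- pos_of(a): first member of the group carrying author a with a non-empty position
def pvB_posOf (grp : List (List (String × String))) (a : String) : String :=
  match grp.find? (fun p =>
      pvB_fld p "authors_extracted" == a && !(pvB_fld p "position_extracted" == "")) with
  | some p => pvB_fld p "position_extracted"
  | none => ""

-- one output row, derived entirely from the id's group
def pvB_row (grp : List (List (String × String))) : List (String × String) :=
  let insts := PySem.List.sorted
    (PySem.Set.ofList ((grp.map (fun p => pvB_fld p "institutions_extracted")).filter
      (fun v => !(v == "")))) (fun x => x) false
  let labels := PySem.List.sorted
    (PySem.Set.ofList ((grp.map (fun p => pvB_fld p "authors_extracted")).filter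
      (fun a => !(a == "")))) (fun x => x) false
  ((((PySem.Dict.ofList (grp.headD [])).insert
      "institutions_extracted" (PySem.Str.join " | " insts)).insert
      "authors_extracted" (PySem.Str.join " | " labels)).insert
      "position_extracted" (PySem.Str.join " | " (labels.map (pvB_posOf grp)))).items

def deduplicate_publications_optimized_alt (all_publications : List (List (String × String))) :
    List (List (String × String)) :=
  let pubs := all_publications.filter (fun p => !(pvB_id p == ""))
  let ids := PySem.List.dedup (pubs.map pvB_id)
  ids.map (fun pid => pvB_row (pubs.filter (fun p => pvB_id p == pid)))

-- ===== PRECONDITION & SPEC =====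
def Spec_deduplicate_publications_optimized (all_publications : List (List (String × String))) (out : List (List (String × String))) : Prop := out = deduplicate_publications_optimized_alt all_publications
instance (all_publications : List (List (String × String))) (out : List (List (String × String))) : Decidable (Spec_deduplicate_publications_optimized all_publications out) := by unfold Spec_deduplicate_publications_optimized; infer_instance

-- ===== CLAIM (what is proved, stated in full; the proofs are below) =====
def Claim_equal_deduplicate_publications_optimized : Prop := ∀ (all_publications : List (List (String × String))), Dom_deduplicate_publications_optimized all_publications → Spec_deduplicate_publications_optimized all_publications (deduplicate_publications_optimized all_publications)

-- ===== LEMMAS AND PROOFS =====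

-- proof-only helpers: keyed view of A's first loop, and its accumulator on (set, dict)
def pvF (pub : List (String × String)) : String × PySem.Dict String String :=
  (pvB_id pub, PySem.Dict.ofList pub)

def pvAcc (acc : PySem.Set String × PySem.Dict String String)
    (d : PySem.Dict String String) : PySem.Set String × PySem.Dict String String :=
  let inst := PySem.Str.strip (d.getD "institutions_extracted" "")
  let insts := if inst == "" then acc.1 else PySem.Set.add acc.1 inst
  let author := PySem.Str.strip (d.getD "authors_extracted" "")
  let ap :=
    if author == "" then acc.2
    else if acc.2.getD author "" == "" then
      acc.2.insert author (PySem.Str.strip (d.getD "position_extracted" ""))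
    else acc.2
  (insts, ap)

lemma pvA_update_eq (e : PySem.Dict String String × (PySem.Set String × PySem.Dict String String))
    (d : PySem.Dict String String) : pvA_update e d = (e.1, pvAcc e.2 d) := by
  unfold pvA_update pvAcc
  by_cases hc : e.2.2.contains (PySem.Str.strip (d.getD "authors_extracted" "")) = true
  · simp [hc]
  · have h0 : e.2.2.getD (PySem.Str.strip (d.getD "authors_extracted" "")) "" = "" :=
      PySem.Dict.getD_of_not_contains e.2.2 "" (by simpa using hc)
    simp [hc, h0]

-- the key → entry step of A's first loop, over the keyed list
def pvAStep (s : PySem.Dict String (PySem.Dict String String × (PySem.Set String × PySem.Dict String String)))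
    (p : String × PySem.Dict String String) :
    PySem.Dict String (PySem.Dict String String × (PySem.Set String × PySem.Dict String String)) :=
  s.insert p.1 (pvA_update ((s.get? p.1).getD (pvA_entryInit p.2)) p.2)

-- A's first loop is the same fold taken over the keyed filtered list
lemma A_seen_eq (pubs : List (List (String × String))) :
    pubs.foldl (fun seen pub =>
      let d := PySem.Dict.ofList pub
      let pid := d.getD "id" ""
      if pid == "" then seen
      else seen.insert pid (pvA_update ((seen.get? pid).getD (pvA_entryInit d)) d)) PySem.Dict.empty
    = ((pubs.filter (fun p => !(pvB_id p == ""))).map pvF).foldl pvAStep PySem.Dict.empty := by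
  rw [List.foldl_map, ← PySem.List.foldl_if_eq_foldl_filter (fun p => !(pvB_id p == ""))
    (fun s pub => pvAStep s (pvF pub))]
  apply PySem.List.foldl_congr_mem
  intro acc p _
  cases h : pvB_id p == "" <;> simp [pvB_id] at h <;> simp [h, pvAStep, pvF, pvB_id]

-- lookup in A's fold = an Option-valued fold over the pubs with that id
lemma get?_foldl_AStep (l : List (String × PySem.Dict String String)) (c : String) :
    ∀ d, ((l.foldl pvAStep d).get? c) =
      (l.filter (fun p => p.1 == c)).foldl
        (fun acc p => some (pvA_update (acc.getD (pvA_entryInit p.2)) p.2)) (d.get? c) := by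
  induction l with
  | nil => intro d; simp
  | cons q t ih =>
    intro d
    simp only [List.foldl_cons, List.filter_cons]
    by_cases h : q.1 = c
    · simp [h, ih, pvAStep]
    · have hb : (q.1 == c) = false := by simpa using h
      simp [hb, ih, pvAStep, PySem.Dict.get?_insert, Ne.symm h]

-- once the accumulator is `some`, the Option-valued fold is a plain fold
lemma foldl_some (l : List (String × PySem.Dict String String))
    (e : PySem.Dict String String × (PySem.Set String × PySem.Dict String String)) :
    l.foldl (fun acc p => some (pvA_update (acc.getD (pvA_entryInit p.2)) p.2)) (some e)
      = some (l.foldl (fun e p => pvA_update e p.2) e) := by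
  induction l generalizing e with
  | nil => simp
  | cons q t ih => simp [ih]

-- A's entry fold keeps the first pub and runs pvAcc on the second component
lemma foldl_update_prod (l : List (String × PySem.Dict String String)) :
    ∀ (a : PySem.Dict String String) (b : PySem.Set String × PySem.Dict String String),
    l.foldl (fun e p => pvA_update e p.2) (a, b) = (a, (l.map (·.2)).foldl pvAcc b) := by
  induction l with
  | nil => intro a b; simp
  | cons q t ih =>
    intro a b
    simp only [List.foldl_cons, List.map_cons]
    rw [pvA_update_eq]
    exact ih a (pvAcc b q.2)

-- the two components of the accumulator evolve independently
def pvInstStep (s : PySem.Set String) (d : PySem.Dict String String) : PySem.Set String :=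
  let inst := PySem.Str.strip (d.getD "institutions_extracted" "")
  if inst == "" then s else PySem.Set.add s inst

def pvApStep (ap : PySem.Dict String String) (d : PySem.Dict String String) :
    PySem.Dict String String :=
  let author := PySem.Str.strip (d.getD "authors_extracted" "")
  if author == "" then ap
  else if ap.getD author "" == "" then
    ap.insert author (PySem.Str.strip (d.getD "position_extracted" ""))
  else ap

lemma foldl_pvAcc_split (l : List (PySem.Dict String String)) :
    ∀ (s : PySem.Set String) (ap : PySem.Dict String String),
    l.foldl pvAcc (s, ap) = (l.foldl pvInstStep s, l.foldl pvApStep ap) := by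
  induction l with
  | nil => intro s ap; rfl
  | cons d t ih =>
    intro s ap
    simp only [List.foldl_cons]
    rw [show pvAcc (s, ap) d = (pvInstStep s d, pvApStep ap d) from rfl]
    exact ih _ _

-- L1: the institutions component is the set of non-empty stripped institutions
lemma inst_foldl (l : List (PySem.Dict String String)) :
    ∀ (s : PySem.Set String),
    l.foldl pvInstStep s =
      PySem.Set.update s ((l.map (fun d => PySem.Str.strip (d.getD "institutions_extracted" ""))).filter
        (fun v => !(v == ""))) := by
  induction l with
  | nil => intro s; simp [PySem.Set.update]
  | cons d t ih =>
    intro s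
    simp only [List.foldl_cons, List.map_cons, List.filter_cons]
    cases h : PySem.Str.strip (d.getD "institutions_extracted" "") == "" <;>
      simp [pvInstStep, h, ih, PySem.Set.update]

-- L2: the keys of the author-position component are the non-empty stripped authors
lemma ap_keys (l : List (PySem.Dict String String)) :
    ∀ (ap : PySem.Dict String String),
    (l.foldl pvApStep ap).keys =
      PySem.Set.update ap.keys ((l.map (fun d => PySem.Str.strip (d.getD "authors_extracted" ""))).filter
        (fun a => !(a == ""))) := by
  induction l with
  | nil => intro ap; simp [PySem.Set.update]
  | cons d t ih =>
    intro ap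
    simp only [List.foldl_cons, List.map_cons, List.filter_cons]
    set a := PySem.Str.strip (d.getD "authors_extracted" "") with ha
    cases h : a == ""
    · simp only [h, Bool.not_false, if_true]
      by_cases hg : ap.getD a "" = ""
      · by_cases hc : ap.contains a = true
        · have hk : (ap.insert a (PySem.Str.strip (d.getD "position_extracted" ""))).keys = ap.keys :=
            PySem.Dict.keys_insert_of_contains ap _ hc
          have hmem : a ∈ ap.keys := (PySem.Dict.contains_iff_mem_keys ap a).mp hc
          simp [pvApStep, ← ha, h, hg, ih, hk, PySem.Set.update, PySem.Set.add, hmem]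
        · have hc' : ap.contains a = false := by simpa using hc
          have hk : (ap.insert a (PySem.Str.strip (d.getD "position_extracted" ""))).keys
              = ap.keys ++ [a] := PySem.Dict.keys_insert_of_not_contains ap _ hc'
          have hnmem : a ∉ ap.keys := fun hm =>
            hc ((PySem.Dict.contains_iff_mem_keys ap a).mpr hm)
          simp [pvApStep, ← ha, h, hg, ih, hk, PySem.Set.update, PySem.Set.add, hnmem]
      · have hmem : a ∈ ap.keys := by
          have hct : ap.contains a = true := by
            cases hq : ap.get? a with
            | none => exact absurd (PySem.Dict.getD_of_get?_eq_none ap "" hq) hg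
            | some v => rw [PySem.Dict.contains_eq_isSome_get?, hq]; rfl
          exact (PySem.Dict.contains_iff_mem_keys ap a).mp hct
        have hg' : (ap.getD a "" == "") = false := by simpa using hg
        simp [pvApStep, ← ha, h, hg', ih, PySem.Set.update, PySem.Set.add, hmem]
    · simp only [h, Bool.not_true, if_false]
      have hz : a = "" := by simpa using h
      simp [pvApStep, ← ha, hz, ih]

-- L3: the looked-up position is the first non-empty one recorded for that author
lemma ap_getD (l : List (PySem.Dict String String)) (a : String) (hane : a ≠ "") :
    ∀ (ap : PySem.Dict String String),
    (l.foldl pvApStep ap).getD a "" =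
      if ap.getD a "" == "" then
        (match l.find? (fun d => PySem.Str.strip (d.getD "authors_extracted" "") == a
            && !(PySem.Str.strip (d.getD "position_extracted" "") == "")) with
         | some d => PySem.Str.strip (d.getD "position_extracted" "")
         | none => "")
      else ap.getD a "" := by
  induction l with
  | nil =>
    intro ap
    cases h : ap.getD a "" == "" <;> simp_all
  | cons d t ih =>
    intro ap
    simp only [List.foldl_cons, List.find?_cons]
    set au := PySem.Str.strip (d.getD "authors_extracted" "") with hau
    set po := PySem.Str.strip (d.getD "position_extracted" "") with hpo
    by_cases hda : au = a
    · subst hda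
      have hz : (au == "") = false := by simpa using hane
      by_cases hg : ap.getD au "" = ""
      · have hstep : pvApStep ap d = ap.insert au po := by
          simp [pvApStep, ← hau, ← hpo, hz, hg]
        have hinsD : (ap.insert au po).getD au "" = po := PySem.Dict.getD_insert_self ap au po ""
        rw [hstep, ih (ap.insert au po), hinsD]
        cases hp : po == ""
        · simp only [hg]
          simp [hp]
          exact hpo
        · have hpo' : po = "" := by simpa using hp
          simp [hg, hp, hpo']
      · have hg' : (ap.getD au "" == "") = false := by simpa using hg
        have hstep : pvApStep ap d = ap := by
          simp [pvApStep, ← hau, hg']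
        rw [hstep, ih ap]
        simp [hg']
    · have hpred : (au == a) = false := by simpa using hda
      cases hz : au == ""
      · by_cases hg : ap.getD au "" = ""
        · have hstep : pvApStep ap d = ap.insert au po := by
            simp [pvApStep, ← hau, ← hpo, hz, hg]
          have hins : (ap.insert au po).getD a "" = ap.getD a "" :=
            PySem.Dict.getD_insert_of_ne ap po "" (Ne.symm hda)
          rw [hstep, ih (ap.insert au po), hins]
          simp [hpred]
        · have hg' : (ap.getD au "" == "") = false := by simpa using hg
          have hstep : pvApStep ap d = ap := by simp [pvApStep, ← hau, hg']
          rw [hstep, ih ap]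
          simp [hpred]
      · have hz' : au = "" := by simpa using hz
        have hstep : pvApStep ap d = ap := by simp [pvApStep, ← hau, hz']
        rw [hstep, ih ap]
        simp [hpred]

-- Set.update from the empty set is Set.ofList
lemma update_nil_eq_ofList (l : List String) :
    PySem.Set.update ([] : PySem.Set String) l = PySem.Set.ofList l := by
  rw [PySem.Set.ofList_eq_foldl]; rfl

-- a set built from an already-filtered list passes A's extra filter unchanged
lemma filter_ofList_filter (l : List String) (p : String → Bool) :
    (PySem.Set.ofList (l.filter p)).filter p = PySem.Set.ofList (l.filter p) := by
  apply List.filter_eq_self.mpr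
  intro x hx
  exact List.of_mem_filter ((PySem.Set.mem_ofList (l.filter p) x).mp hx)

-- members of the deduplicated filtered list satisfy the filter
lemma mem_ofList_filter {l : List String} {p : String → Bool} {x : String}
    (hx : x ∈ PySem.Set.ofList (l.filter p)) : p x = true :=
  List.of_mem_filter ((PySem.Set.mem_ofList (l.filter p) x).mp hx)

-- the formatter applied to A's accumulated entry equals B's per-group row
lemma fmt_eq_row (grp : List (List (String × String))) :
    pvA_fmt (PySem.Dict.ofList (grp.headD []),
      (grp.map PySem.Dict.ofList).foldl pvAcc (PySem.Set.empty, PySem.Dict.empty))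
    = pvB_row grp := by
  unfold pvA_fmt pvB_row
  rw [foldl_pvAcc_split, inst_foldl, ap_keys]
  simp only [List.map_map]
  have hmapI : (grp.map ((fun d => PySem.Str.strip (d.getD "institutions_extracted" "")) ∘ PySem.Dict.ofList))
      = grp.map (fun p => pvB_fld p "institutions_extracted") := rfl
  have hmapA : (grp.map ((fun d => PySem.Str.strip (d.getD "authors_extracted" "")) ∘ PySem.Dict.ofList))
      = grp.map (fun p => pvB_fld p "authors_extracted") := rfl
  rw [hmapI, hmapA]
  rw [show (PySem.Dict.empty : PySem.Dict String String).keys = ([] : List String) from rfl]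
  rw [show (PySem.Set.empty : PySem.Set String) = ([] : List String) from rfl]
  rw [update_nil_eq_ofList, update_nil_eq_ofList, filter_ofList_filter]
  have hmaps : List.map (fun a => (List.foldl pvApStep PySem.Dict.empty (List.map PySem.Dict.ofList grp)).getD a "")
        (PySem.List.sorted (PySem.Set.ofList ((grp.map (fun p => pvB_fld p "authors_extracted")).filter (fun a => !(a == "")))) (fun x => x) false)
      = List.map (pvB_posOf grp)
        (PySem.List.sorted (PySem.Set.ofList ((grp.map (fun p => pvB_fld p "authors_extracted")).filter (fun a => !(a == "")))) (fun x => x) false) := by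
    apply List.map_congr_left
    intro a ha
    have hane : a ≠ "" := by
      have := mem_ofList_filter ((PySem.List.mem_sorted _ _ _ _).mp ha)
      simpa using this
    rw [ap_getD _ a hane]
    simp only [PySem.Dict.getD_empty, BEq.rfl, if_true]
    rw [List.find?_map]
    have hpred : ((fun d => PySem.Str.strip (PySem.Dict.getD d "authors_extracted" "") == a
          && !(PySem.Str.strip (PySem.Dict.getD d "position_extracted" "") == "")) ∘ PySem.Dict.ofList)
        = (fun p => pvB_fld p "authors_extracted" == a && !(pvB_fld p "position_extracted" == "")) := rfl
    rw [hpred]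
    unfold pvB_posOf
    cases grp.find? (fun p => pvB_fld p "authors_extracted" == a && !(pvB_fld p "position_extracted" == "")) <;> rfl
  rw [hmaps]

lemma A_eq_B (pubs : List (List (String × String))) :
    deduplicate_publications_optimized pubs = deduplicate_publications_optimized_alt pubs := by
  unfold deduplicate_publications_optimized deduplicate_publications_optimized_alt
  dsimp only
  rw [A_seen_eq]
  set flt := pubs.filter (fun p => !(pvB_id p == "")) with hflt
  set keyed := flt.map pvF with hkeyed
  set S := keyed.foldl pvAStep PySem.Dict.empty with hS
  have hSkeys : S.keys = PySem.Set.ofList (flt.map pvB_id) := by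
    rw [hS]
    unfold pvAStep
    rw [PySem.Dict.keys_foldl_insert_key keyed (·.1)
      (fun s p => pvA_update ((s.get? p.1).getD (pvA_entryInit p.2)) p.2) PySem.Dict.empty]
    rw [hkeyed, List.map_map]
    rw [show (List.map ((·.1) ∘ pvF) flt) = flt.map pvB_id from rfl]
    rw [show (PySem.Dict.empty : PySem.Dict String (PySem.Dict String String × (PySem.Set String × PySem.Dict String String))).keys = ([] : List String) from rfl]
    exact update_nil_eq_ofList _
  have hSnd : S.keys.Nodup := by
    rw [hS]
    unfold pvAStep
    exact PySem.Dict.nodup_keys_foldl_insert_key keyed (·.1)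
      (fun s p => pvA_update ((s.get? p.1).getD (pvA_entryInit p.2)) p.2) PySem.Dict.empty
      (by simp [PySem.Dict.empty])
  rw [PySem.List.foldl_append_singleton_eq_map, List.nil_append]
  rw [PySem.Dict.values_eq_map_keys S hSnd (pvA_entryInit PySem.Dict.empty)]
  rw [PySem.List.dedup_eq_ofList, hSkeys, List.map_map]
  apply List.map_congr_left
  intro c hc
  -- c occurs among the ids, so its group is non-empty
  have hcmem : c ∈ flt.map pvB_id := (PySem.Set.mem_ofList (flt.map pvB_id) c).mp hc
  obtain ⟨p0, hp0, hp0c⟩ := List.mem_map.mp hcmem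
  set grpc := flt.filter (fun p => pvB_id p == c) with hgrpc
  have hkf : keyed.filter (fun p => p.1 == c) = grpc.map pvF := by
    rw [hkeyed, hgrpc]
    exact List.filter_map (f := pvF) (p := fun p => p.1 == c) (l := flt)
  have hgrpcne : grpc ≠ [] := by
    intro hnil
    have : p0 ∈ grpc := by
      rw [hgrpc, List.mem_filter]
      exact ⟨hp0, by simp [hp0c]⟩
    rw [hnil] at this
    exact absurd this (List.not_mem_nil)
  cases hg : grpc with
  | nil => exact absurd hg hgrpcne
  | cons h0 tl =>
    have hSc : S.getD c (pvA_entryInit PySem.Dict.empty)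
        = (PySem.Dict.ofList h0, (grpc.map PySem.Dict.ofList).foldl pvAcc
            (PySem.Set.empty, PySem.Dict.empty)) := by
      rw [PySem.Dict.getD_eq_get?_getD, hS, get?_foldl_AStep, hkf, hg]
      simp only [List.map_cons, List.foldl_cons, PySem.Dict.get?_empty, Option.getD_none]
      rw [foldl_some]
      rw [pvA_update_eq (pvA_entryInit (pvF h0).2) (pvF h0).2, foldl_update_prod]
      simp only [pvA_entryInit, pvF, Option.getD_some, List.map_map]
      rfl
    simp only [Function.comp_apply]
    rw [hSc, ← hg]
    have : PySem.Dict.ofList h0 = PySem.Dict.ofList (grpc.headD []) := by rw [hg]; rfl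
    rw [this]
    exact fmt_eq_row grpc

-- ===== VERDICT (by name: the statement is the Claim_ definition above) =====
theorem deduplicate_publications_optimized_spec : Claim_equal_deduplicate_publications_optimized := by
  intro pubs _
  unfold Spec_deduplicate_publications_optimized
  exact A_eq_B pubs
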